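-- pv_equiv track=rewrite | github.com/ZBeimnet/competitiveProgramming | Week-05/Day-23(contest)/FadiAndLCM.py | fadi_and_lcm
-- ===== SOURCE A (Python) =====
-- import math
--
-- def fadi_and_lcm(x):
--     minn = [1, x]
--     for i in range(2, math.ceil(math.sqrt(x))):
--         if x % i == 0:
--             if lcm(i, x//i) == x:
--                 if max(i, x//i) < max(minn[0], minn[1]):
--                     minn = [i, x//i]
--
--     return str(minn[0]) + " " + str(minn[1])
--
-- def gcd(num1, num2):
--     if num1 == 0:
--         return num2
--     return gcd(num2 % num1, num1)
--
-- def lcm(a, b):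
--     return (a*b)//gcd(a, b)
-- ===== SOURCE B (Python) =====
-- import math
--
-- def fadi_and_lcm(x):
--     # count down from isqrt(x): first divisor d with d*d < x and gcd(d, x//d) == 1
--     # is the one minimizing the larger factor x//d
--     d = math.isqrt(x) if x > 0 else 0
--     while d >= 2 and not (d * d < x and x % d == 0 and math.gcd(d, x // d) == 1):
--         d -= 1
--     if d < 2:
--         d = 1
--     return str(d) + " " + str(x // d)
-- ===== Notes on version B (the rewrite author's own statement) =====
-- stated objective: alternative
-- what changed: Instead of scanning every i ascending in 2..ceil(sqrt(x)) while tracking the pair minimizing the larger factor, B counts down from isqrt(x) and returns at the first coprime divisor found, which is exactly the minimizing one; the min-tracking state disappears.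
import Mathlib
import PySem

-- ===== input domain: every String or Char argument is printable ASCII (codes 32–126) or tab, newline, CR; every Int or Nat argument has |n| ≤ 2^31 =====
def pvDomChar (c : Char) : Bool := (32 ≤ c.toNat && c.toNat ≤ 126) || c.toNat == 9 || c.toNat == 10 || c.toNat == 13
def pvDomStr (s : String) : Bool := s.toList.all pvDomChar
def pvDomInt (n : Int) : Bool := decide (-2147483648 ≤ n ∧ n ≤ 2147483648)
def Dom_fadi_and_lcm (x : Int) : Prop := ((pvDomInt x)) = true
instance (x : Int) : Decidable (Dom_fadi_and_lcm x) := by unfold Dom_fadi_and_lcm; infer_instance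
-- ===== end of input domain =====

-- B replaces A's full ascending scan 2..ceil(sqrt(x)) with a countdown from isqrt(x) that
-- returns at the FIRST coprime divisor (the one minimizing the larger factor); return values only.

-- ===== PORT A =====
-- termination measure for the Euclidean recursion: |b mod a| < |a| for a ≠ 0 (Python mod has the divisor's sign)
theorem pyModAbsLt (a b : Int) (h : ¬ b = 0) : (PySem.Int.mod a b).natAbs < b.natAbs := by
  rcases lt_or_gt_of_ne h with hb | hb
  · have h1 := PySem.Int.mod_neg_bounds a hb
    omega
  · have h1 := PySem.Int.mod_nonneg a hb
    have h2 := PySem.Int.mod_lt a hb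
    omega

-- same-module helper gcd(num1, num2) of A, with Python's floor-mod
def pyGcd (num1 num2 : Int) : Int :=
  if num1 = 0 then num2 else pyGcd (PySem.Int.mod num2 num1) num1
termination_by num1.natAbs
decreasing_by exact pyModAbsLt num2 num1 (by assumption)

-- same-module helper lcm(a, b) of A
def pyLcm (a b : Int) : Int := PySem.Int.floordiv (a * b) (pyGcd a b)

-- math.ceil(math.sqrt(x)): exact integer value for 0 ≤ x ≤ 2^31 (the double sqrt is correctly
-- rounded and never crosses an integer boundary in this range); Python raises ValueError for
-- x < 0, which Pre_ excludes.
def ceilSqrt (x : Int) : Int :=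
  if Nat.sqrt x.toNat * Nat.sqrt x.toNat = x.toNat then (Nat.sqrt x.toNat : Int)
  else (Nat.sqrt x.toNat : Int) + 1

-- the body of A's for-loop
def fadiStep (x : Int) (minn : Int × Int) (i : Int) : Int × Int :=
  if PySem.Int.mod x i = 0 then
    if pyLcm i (PySem.Int.floordiv x i) = x then
      if max i (PySem.Int.floordiv x i) < max minn.1 minn.2 then (i, PySem.Int.floordiv x i)
      else minn
    else minn
  else minn

def fadi_and_lcm (x : Int) : String :=
  let minn := (PySem.List.pyRange 2 (ceilSqrt x) 1).foldl (fadiStep x) (1, x)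
  PySem.Int.toStr minn.1 ++ " " ++ PySem.Int.toStr minn.2

-- ===== PORT B =====
-- the while-loop of Source B: count d down from isqrt(x) until the condition holds or d < 2;
-- returns the final chosen divisor (1 when none qualifies)
def bestDiv (x : Int) : Nat → Int
  | 0 => 1
  | 1 => 1
  | d + 2 =>
    if ((d : Int) + 2) * ((d : Int) + 2) < x ∧ PySem.Int.mod x ((d : Int) + 2) = 0 ∧
        Int.gcd ((d : Int) + 2) (PySem.Int.floordiv x ((d : Int) + 2)) = 1
    then (d : Int) + 2 else bestDiv x (d + 1)

def fadi_and_lcm_alt (x : Int) : String :=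
  let d := bestDiv x (if 0 < x then Nat.sqrt x.toNat else 0)
  PySem.Int.toStr d ++ " " ++ PySem.Int.toStr (PySem.Int.floordiv x d)

-- ===== PRECONDITION & SPEC =====
-- Pre_: math.sqrt raises ValueError for negative x, so A only returns on x ≥ 0
def Pre_fadi_and_lcm (x : Int) : Prop := 0 ≤ x
instance (x : Int) : Decidable (Pre_fadi_and_lcm x) := by unfold Pre_fadi_and_lcm; infer_instance
def pvWitness_fadi_and_lcm : Int := 6

def Spec_fadi_and_lcm (x : Int) (out : String) : Prop := out = fadi_and_lcm_alt x
instance (x : Int) (out : String) : Decidable (Spec_fadi_and_lcm x out) := by unfold Spec_fadi_and_lcm; infer_instance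

-- ===== CLAIM (what is proved, stated in full; the proofs are below) =====
def Claim_equal_fadi_and_lcm : Prop := ∀ (x : Int), Dom_fadi_and_lcm x → Pre_fadi_and_lcm x → Spec_fadi_and_lcm x (fadi_and_lcm x)

-- ===== LEMMAS AND PROOFS =====

theorem gcd_emod_left (a b : Int) (ha : 0 < a) (hb : 0 ≤ b) : Int.gcd (b % a) a = Int.gcd a b := by
  rw [Int.gcd_def, Int.gcd_def]
  have h0 : 0 ≤ b % a := Int.emod_nonneg b (by omega)
  have h1 : (b % a).natAbs = b.natAbs % a.natAbs := by
    have h2 : b % a = (b.natAbs : Int) % (a.natAbs : Int) := by congr 1 <;> omega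
    omega
  rw [h1, ← Nat.gcd_rec]

theorem pyGcd_eq_gcd (a b : Int) (ha : 0 ≤ a) (hb : 0 ≤ b) : pyGcd a b = (Int.gcd a b : Int) := by
  induction a, b using pyGcd.induct with
  | case1 b => rw [pyGcd, if_pos rfl, Int.gcd_zero_left]; omega
  | case2 a b hne ih =>
    have ha' : 0 < a := lt_of_le_of_ne ha (Ne.symm hne)
    rw [pyGcd, if_neg hne]
    rw [PySem.Int.mod_eq_emod_of_pos ha'] at ih ⊢
    rw [ih (Int.emod_nonneg b (by omega)) (le_of_lt ha'), gcd_emod_left a b ha' hb]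

-- "lcm(i, x//i) == x" is exactly coprimality of the two factors
theorem lcm_iff (x i : Int) (hx : 0 < x) (hi : 2 ≤ i) (hd : i ∣ x) :
    (pyLcm i (PySem.Int.floordiv x i) = x) ↔ Int.gcd i (PySem.Int.floordiv x i) = 1 := by
  have hi0 : 0 < i := by omega
  rw [PySem.Int.floordiv_eq_ediv_of_pos hi0]
  set y := x / i with hy
  have hiy : i * y = x := Int.mul_ediv_cancel' hd
  have hy0 : 0 < y := by
    rcases lt_trichotomy y 0 with h | h | h
    · nlinarith
    · exfalso; rw [h, mul_zero] at hiy; omega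
    · exact h
  have hgpos : 0 < Int.gcd i y := Int.gcd_pos_of_ne_zero_left y (by omega)
  have hgy : pyGcd i y = (Int.gcd i y : Int) := pyGcd_eq_gcd i y (by omega) (by omega)
  have hgdvd : (Int.gcd i y : Int) ∣ x := dvd_trans (Int.gcd_dvd_left i y) hd
  constructor
  · intro h
    rw [pyLcm, hgy, hiy, PySem.Int.floordiv_eq_ediv_of_pos (by exact_mod_cast hgpos)] at h
    have hxg : (Int.gcd i y : Int) * (x / (Int.gcd i y : Int)) = x := Int.mul_ediv_cancel' hgdvd
    rw [h] at hxg
    have hg1 : (Int.gcd i y : Int) = 1 :=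
      mul_right_cancel₀ (show x ≠ 0 by omega) (by rw [hxg, one_mul])
    exact_mod_cast hg1
  · intro h
    rw [pyLcm, hgy, h, hiy]
    have h1 : ((1 : Nat) : Int) = 1 := by norm_num
    rw [h1, PySem.Int.floordiv_eq_ediv_of_pos one_pos, Int.ediv_one]

-- the state A's loop carries after scanning candidates 2..k, computed from the top:
-- the largest coprime divisor pair found so far, (1, x) when none
def stateOf (x : Int) : Nat → Int × Int
  | 0 => (1, x)
  | 1 => (1, x)
  | d + 2 =>
    if PySem.Int.mod x ((d : Int) + 2) = 0 ∧
        Int.gcd ((d : Int) + 2) (PySem.Int.floordiv x ((d : Int) + 2)) = 1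
    then ((d : Int) + 2, PySem.Int.floordiv x ((d : Int) + 2)) else stateOf x (d + 1)

-- shape of the state: initial, or a divisor pair (j, x//j) with 2 ≤ j ≤ k
theorem stateOf_shape (x : Int) (k : Nat) :
    stateOf x k = (1, x) ∨
      ∃ j : Nat, 2 ≤ j ∧ j ≤ k ∧ ((j : Int)) ∣ x ∧ stateOf x k = ((j : Int), PySem.Int.floordiv x (j : Int)) := by
  induction k with
  | zero => left; rfl
  | succ d ih =>
    match d, ih with
    | 0, _ => left; rfl
    | e + 1, ih =>
      rw [stateOf]
      split_ifs with h
      · right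
        refine ⟨e + 2, by omega, by omega, ?_, ?_⟩
        · have := (PySem.Int.mod_eq_zero_iff_dvd x ((e : Int) + 2)).mp h.1
          push_cast
          exact this
        · push_cast
          rfl
      · rcases ih with h1 | ⟨j, hj1, hj2, hj3, hj4⟩
        · left; exact h1
        · right; exact ⟨j, hj1, by omega, hj3, hj4⟩

-- A's fold over range(2, k+1) computes stateOf x k, provided every candidate satisfies i² < x
theorem fold_eq_stateOf (x : Int) : ∀ k : Nat, 0 < x → ((k : Int) * (k : Int) < x) →
    (PySem.List.pyRange 2 ((k : Int) + 1) 1).foldl (fadiStep x) (1, x) = stateOf x k := by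
  intro k
  induction k with
  | zero =>
    intro _ _
    rw [PySem.List.pyRange_one_eq_nil (by norm_num)]
    rfl
  | succ d ih =>
    match d, ih with
    | 0, _ =>
      intro _ _
      rw [PySem.List.pyRange_one_eq_nil (by norm_num)]
      rfl
    | e + 1, ih =>
      intro hx hk
      have hii : ((e : Int) + 2) * ((e : Int) + 2) < x := by push_cast at hk; nlinarith
      have hstep : ((e + 1 : Nat) : Int) * ((e + 1 : Nat) : Int) < x := by
        push_cast at hk ⊢; nlinarith
      have hsplit : PySem.List.pyRange 2 (((e + 1 + 1 : Nat) : Int) + 1) 1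
          = PySem.List.pyRange 2 (((e + 1 : Nat) : Int) + 1) 1 ++ [(e : Int) + 2] := by
        have h2 := PySem.List.pyRange_one_succ_right (a := (2 : Int)) (b := (e : Int) + 2)
          (by push_cast; omega)
        push_cast at h2
        convert h2 using 2
      rw [hsplit, List.foldl_append, ih hx hstep]
      show fadiStep x (stateOf x (e + 1)) ((e : Int) + 2) = stateOf x (e + 1 + 1)
      by_cases hm : PySem.Int.mod x ((e : Int) + 2) = 0
      · have hd : ((e : Int) + 2) ∣ x := (PySem.Int.mod_eq_zero_iff_dvd x _).mp hm
        have hdivpos : (0 : Int) < (e : Int) + 2 := by positivity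
        have hfd : PySem.Int.floordiv x ((e : Int) + 2) = x / ((e : Int) + 2) :=
          PySem.Int.floordiv_eq_ediv_of_pos hdivpos
        have hiy : ((e : Int) + 2) * (x / ((e : Int) + 2)) = x := Int.mul_ediv_cancel' hd
        have hylt : (e : Int) + 2 < x / ((e : Int) + 2) := by nlinarith
        have hyx : x / ((e : Int) + 2) < x := by nlinarith
        by_cases hg : Int.gcd ((e : Int) + 2) (PySem.Int.floordiv x ((e : Int) + 2)) = 1
        · have hmax : max ((e : Int) + 2) (PySem.Int.floordiv x ((e : Int) + 2))
              < max (stateOf x (e + 1)).1 (stateOf x (e + 1)).2 := by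
            rcases stateOf_shape x (e + 1) with hs | ⟨j, hj1, hj2, hj3, hs⟩
            · rw [hs, hfd]
              rw [max_eq_right (by omega : (e : Int) + 2 ≤ x / ((e : Int) + 2)),
                  max_eq_right (by omega : (1 : Int) ≤ x)]
              omega
            · rw [hs, hfd]
              have hjpos : (0 : Int) < (j : Int) := by exact_mod_cast (by omega : 0 < j)
              have hpy : PySem.Int.floordiv x (j : Int) = x / (j : Int) :=
                PySem.Int.floordiv_eq_ediv_of_pos hjpos
              have hjp : (j : Int) * (x / (j : Int)) = x := Int.mul_ediv_cancel' hj3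
              have hji : (j : Int) < (e : Int) + 2 := by
                have : (j : Int) ≤ (e : Int) + 1 := by exact_mod_cast (by omega : j ≤ e + 1)
                omega
              have hjj : (j : Int) * (j : Int) < x := by nlinarith
              have hjlt : (j : Int) < x / (j : Int) := by nlinarith
              have hqp : x / ((e : Int) + 2) < x / (j : Int) := by nlinarith
              rw [hpy, max_eq_right (by omega : (e : Int) + 2 ≤ x / ((e : Int) + 2)),
                  max_eq_right (by omega : (j : Int) ≤ x / (j : Int))]
              exact hqp
          have hL : fadiStep x (stateOf x (e + 1)) ((e : Int) + 2)
              = ((e : Int) + 2, PySem.Int.floordiv x ((e : Int) + 2)) := by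
            rw [fadiStep, if_pos hm, if_pos ((lcm_iff x ((e : Int) + 2) hx (by omega) hd).mpr hg),
                if_pos hmax]
          have hR : stateOf x (e + 1 + 1)
              = ((e : Int) + 2, PySem.Int.floordiv x ((e : Int) + 2)) := by
            rw [stateOf, if_pos (And.intro hm hg)]
          rw [hL, hR]
        · have hL : fadiStep x (stateOf x (e + 1)) ((e : Int) + 2) = stateOf x (e + 1) := by
            rw [fadiStep, if_pos hm,
                if_neg (fun hc => hg ((lcm_iff x ((e : Int) + 2) hx (by omega) hd).mp hc))]
          have hR : stateOf x (e + 1 + 1) = stateOf x (e + 1) := by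
            rw [stateOf, if_neg (fun hc => hg hc.2)]
          rw [hL, hR]
      · have hL : fadiStep x (stateOf x (e + 1)) ((e : Int) + 2) = stateOf x (e + 1) := by
          rw [fadiStep, if_neg hm]
        have hR : stateOf x (e + 1 + 1) = stateOf x (e + 1) := by
          rw [stateOf, if_neg (fun hc => hm hc.1)]
        rw [hL, hR]

-- B's countdown computes the same state, as a (divisor, cofactor) pair
theorem bestDiv_eq_stateOf (x : Int) : ∀ k : Nat, 0 < x → ((k : Int) * (k : Int) < x) →
    ((bestDiv x k, PySem.Int.floordiv x (bestDiv x k)) = stateOf x k) := by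
  intro k
  induction k with
  | zero =>
    intro hx _
    rw [bestDiv, stateOf, PySem.Int.floordiv_eq_ediv_of_pos (by norm_num : (0 : Int) < 1),
      Int.ediv_one]
  | succ d ih =>
    match d, ih with
    | 0, _ =>
      intro hx _
      rw [bestDiv, stateOf, PySem.Int.floordiv_eq_ediv_of_pos (by norm_num : (0 : Int) < 1),
        Int.ediv_one]
    | e + 1, ih =>
      intro hx hk
      have hii : ((e : Int) + 2) * ((e : Int) + 2) < x := by push_cast at hk; nlinarith
      have hstep : ((e + 1 : Nat) : Int) * ((e + 1 : Nat) : Int) < x := by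
        push_cast at hk ⊢; nlinarith
      by_cases hc : PySem.Int.mod x ((e : Int) + 2) = 0 ∧
          Int.gcd ((e : Int) + 2) (PySem.Int.floordiv x ((e : Int) + 2)) = 1
      · rw [bestDiv, stateOf, if_pos (And.intro hii (And.intro hc.1 hc.2)), if_pos hc]
      · rw [bestDiv, stateOf, if_neg (fun h => hc (And.intro h.2.1 h.2.2)), if_neg hc]
        exact ih hx hstep

-- ===== VERDICT (by name: the statement is the Claim_ definition above) =====
theorem fadi_and_lcm_spec : Claim_equal_fadi_and_lcm := by
  intro x _ hpre
  unfold Spec_fadi_and_lcm Pre_fadi_and_lcm at *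
  rcases eq_or_lt_of_le hpre with h0 | hx
  · rw [← h0]; decide
  rcases eq_or_lt_of_le (by omega : (1 : Int) ≤ x) with h1 | hx2
  · rw [← h1]; decide
  rw [fadi_and_lcm, fadi_and_lcm_alt, if_pos hx, ceilSqrt]
  obtain ⟨n, hn⟩ : ∃ n : Nat, x.toNat = n := ⟨_, rfl⟩
  rw [hn]
  have hxn : x = (n : Int) := by omega
  have hn2 : 2 ≤ n := by omega
  obtain ⟨r, hr⟩ : ∃ r, Nat.sqrt n = r := ⟨_, rfl⟩
  rw [hr]
  by_cases hsq : r * r = n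
  · rw [if_pos hsq]
    have hr2 : 2 ≤ r := by
      rcases Nat.lt_or_ge r 2 with hcon | h2
      · interval_cases r <;> omega
      · exact h2
    obtain ⟨e, rfl⟩ : ∃ e, r = e + 2 := ⟨r - 2, by omega⟩
    have hrx : ((e + 2 : Nat) : Int) * ((e + 2 : Nat) : Int) = x := by
      rw [hxn, ← hsq]; push_cast; ring
    have hklt : ((e + 1 : Nat) : Int) * ((e + 1 : Nat) : Int) < x := by
      push_cast at hrx ⊢; nlinarith
    have hb : ((e + 2 : Nat) : Int) = ((e + 1 : Nat) : Int) + 1 := by push_cast; ring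
    rw [hb, fold_eq_stateOf x (e + 1) hx hklt]
    have hbd : bestDiv x (e + 2) = bestDiv x (e + 1) := by
      rw [bestDiv, if_neg ?_]
      push_cast at hrx
      intro hcontra
      nlinarith [hcontra.1]
    rw [hbd, ← bestDiv_eq_stateOf x (e + 1) hx hklt]
  · rw [if_neg hsq]
    have hklt : (r : Int) * (r : Int) < x := by
      have h1 : r * r ≤ n := by
        have h0 := Nat.sqrt_le' n
        rw [pow_two, hr] at h0
        exact h0
      have h3 : r * r < n := lt_of_le_of_ne h1 hsq
      rw [hxn]; exact_mod_cast h3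
    rw [fold_eq_stateOf x r hx hklt, ← bestDiv_eq_stateOf x r hx hklt]
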